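-- pv_equiv track=rewrite | github.com/ductai199x/synth-img-det-benchmark | methods/method6_zed/utils.py | get_shapes
-- ===== SOURCE A (Python) =====
-- from typing import List, Tuple
--
-- def get_shapes(H: int, W: int) -> List[Tuple[int, int]]:
--     shapes = [(H, W)]
--     h = H
--     w = W
--     for _ in range(3):
--         h = (h + 1) // 2
--         w = (w + 1) // 2
--         shapes.append((h, w))
--     return shapes
-- ===== SOURCE B (Python) =====
-- def get_shapes(H: int, W: int):
--     return [(-(-H // (2 ** k)), -(-W // (2 ** k))) for k in range(4)]
-- ===== Notes on version B (the rewrite author's own statement) =====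
-- stated objective: simpler
-- what changed: Replaces the stateful loop carrying running h/w accumulators with a closed-form comprehension computing each level independently as ceil(H/2^k), ceil(W/2^k) via -(-n//2^k).
import Mathlib
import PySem

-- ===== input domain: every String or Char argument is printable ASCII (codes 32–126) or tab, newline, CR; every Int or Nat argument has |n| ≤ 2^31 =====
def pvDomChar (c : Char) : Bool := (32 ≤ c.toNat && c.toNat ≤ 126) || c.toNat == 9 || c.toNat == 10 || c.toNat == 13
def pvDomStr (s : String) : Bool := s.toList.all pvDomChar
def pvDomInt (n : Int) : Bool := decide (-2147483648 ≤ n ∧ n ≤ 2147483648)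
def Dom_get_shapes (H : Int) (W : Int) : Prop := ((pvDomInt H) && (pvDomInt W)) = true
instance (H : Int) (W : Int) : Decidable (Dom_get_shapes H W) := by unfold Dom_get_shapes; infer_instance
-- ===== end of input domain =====

-- B replaces A's stateful halving loop with a closed-form per-level formula ceil(n/2^k); objective: simpler.


-- ===== PORT A =====
-- loop over range(3) carrying (shapes, h, w)
def get_shapes (H : Int) (W : Int) : List (Int × Int) :=
  let st :=
    (PySem.List.pyRange 0 3 1).foldl
      (fun (st : List (Int × Int) × Int × Int) _ =>
        let h := PySem.Int.floordiv (st.2.1 + 1) 2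
        let w := PySem.Int.floordiv (st.2.2 + 1) 2
        (st.1 ++ [(h, w)], h, w))
      ([(H, W)], H, W)
  st.1

-- ===== PORT B =====
def get_shapes_alt (H : Int) (W : Int) : List (Int × Int) :=
  (PySem.List.pyRange 0 4 1).map
    (fun k => (-(PySem.Int.floordiv (-H) (2 ^ k.toNat)), -(PySem.Int.floordiv (-W) (2 ^ k.toNat))))

-- ===== PRECONDITION & SPEC =====
def Spec_get_shapes (H : Int) (W : Int) (out : List (Int × Int)) : Prop := out = get_shapes_alt H W
instance (H : Int) (W : Int) (out : List (Int × Int)) : Decidable (Spec_get_shapes H W out) := by unfold Spec_get_shapes; infer_instance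

-- ===== CLAIM (what is proved, stated in full; the proofs are below) =====
def Claim_equal_get_shapes : Prop := ∀ (H : Int) (W : Int), Dom_get_shapes H W → Spec_get_shapes H W (get_shapes H W)

-- ===== LEMMAS AND PROOFS =====
theorem pyRange03 : PySem.List.pyRange 0 3 1 = [0, 1, 2] := by decide
theorem pyRange04 : PySem.List.pyRange 0 4 1 = [0, 1, 2, 3] := by decide

theorem fd_pos (a b : Int) (hb : 0 < b) : PySem.Int.floordiv a b = a / b :=
  PySem.Int.floordiv_eq_ediv_of_pos hb

-- ===== VERDICT (by name: the statement is the Claim_ definition above) =====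
theorem get_shapes_spec : Claim_equal_get_shapes := by
  intro H W _
  unfold Spec_get_shapes get_shapes get_shapes_alt
  simp only [pyRange03, pyRange04, List.foldl, List.map, Int.toNat_zero, Int.toNat_one,
    show ((2:Int)).toNat = 2 from rfl, show ((3:Int)).toNat = 3 from rfl]
  norm_num [fd_pos _ 1 (by norm_num), fd_pos _ 2 (by norm_num),
    fd_pos _ 4 (by norm_num), fd_pos _ 8 (by norm_num)]
  omega
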